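-- pv_equiv track=rewrite | github.com/kartiksiva/PDCD-V2 | backend/app/export_builder.py | _is_safe_storage_key
-- ===== SOURCE A (Python) =====
-- def _is_safe_storage_key(storage_key: str) -> bool:
--     normalized = (storage_key or "").strip().replace("\\", "/")
--     if not normalized:
--         return False
--     if normalized.startswith("/") or normalized.startswith("./"):
--         return False
--     parts = normalized.split("/")
--     if any(part in ("", ".", "..") for part in parts):
--         return False
--     return True
-- ===== SOURCE B (Python) =====
-- def _is_safe_storage_key(storage_key: str) -> bool:
--     normalized = (storage_key or "").strip().replace("\\", "/")
--     count, dots = 0, True  # length of current segment, and whether it is all dots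
--     for ch in normalized + "/":
--         if ch == "/":
--             if count == 0 or (dots and count <= 2):
--                 return False
--             count, dots = 0, True
--         else:
--             count += 1
--             dots = dots and ch == "."
--     return True
-- ===== Notes on version B (the rewrite author's own statement) =====
-- stated objective: alternative
-- what changed: Instead of splitting the normalized key into slash-separated segments and scanning the list (plus redundant startswith guards), B validates in a single character pass that keeps only the current segment's length and an all-dots flag, with no intermediate list and no prefix checks.
import Mathlib
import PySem

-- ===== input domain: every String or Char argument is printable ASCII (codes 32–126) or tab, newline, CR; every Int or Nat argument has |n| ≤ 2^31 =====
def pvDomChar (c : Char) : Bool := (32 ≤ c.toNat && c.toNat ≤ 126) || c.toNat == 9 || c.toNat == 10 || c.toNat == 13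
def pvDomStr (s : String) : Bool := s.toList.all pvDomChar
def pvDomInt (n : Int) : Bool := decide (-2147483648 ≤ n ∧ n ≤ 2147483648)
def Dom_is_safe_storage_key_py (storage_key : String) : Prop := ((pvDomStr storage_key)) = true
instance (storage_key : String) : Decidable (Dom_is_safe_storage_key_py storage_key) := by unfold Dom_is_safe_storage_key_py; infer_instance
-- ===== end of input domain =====

-- B replaces A's split-into-parts-then-scan by a single character pass that keeps only the
-- current segment's length and an all-dots flag (objective: alternative; no intermediate list).

-- ===== PORT A =====
def is_safe_storage_key_py (storage_key : String) : Bool :=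
  -- `(storage_key or "")`: a str is falsy iff it is empty
  let base := if storage_key.toList.isEmpty then "" else storage_key
  let normalized := PySem.Str.replace (PySem.Str.strip base) "\\" "/"
  if PySem.Str.len normalized == 0 then false           -- `if not normalized`
  else if PySem.Str.startswith normalized "/" || PySem.Str.startswith normalized "./" then false
  else if (PySem.Chars.splitOn normalized.toList ['/']).any
            (fun p => decide (p = []) || decide (p = ['.']) || decide (p = ['.', '.'])) then false
  else true

-- ===== PORT B =====
-- the `for ch in normalized + "/"` loop of Source B: state = (count, dots); `return False` = false
def altLoop : List Char → Nat → Bool → Bool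
  | [], _, _ => true
  | c :: rest, count, dots =>
    if c = '/' then
      if count == 0 || (dots && count ≤ 2) then false
      else altLoop rest 0 true
    else altLoop rest (count + 1) (dots && c == '.')

def is_safe_storage_key_py_alt (storage_key : String) : Bool :=
  let base := if storage_key.toList.isEmpty then "" else storage_key
  let normalized := PySem.Str.replace (PySem.Str.strip base) "\\" "/"
  altLoop (normalized.toList ++ ['/']) 0 true

-- ===== PRECONDITION & SPEC =====
def Spec_is_safe_storage_key_py (storage_key : String) (out : Bool) : Prop := out = is_safe_storage_key_py_alt storage_key
instance (storage_key : String) (out : Bool) : Decidable (Spec_is_safe_storage_key_py storage_key out) := by unfold Spec_is_safe_storage_key_py; infer_instance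

-- ===== CLAIM (what is proved, stated in full; the proofs are below) =====
def Claim_equal_is_safe_storage_key_py : Prop := ∀ (storage_key : String), Dom_is_safe_storage_key_py storage_key → Spec_is_safe_storage_key_py storage_key (is_safe_storage_key_py storage_key)

-- ===== LEMMAS AND PROOFS =====

/-- Reference split of a char list at '/', carrying the reversed current segment. -/
def mySplit : List Char → List Char → List (List Char)
  | [], cur => [cur.reverse]
  | c :: rest, cur => if c = '/' then cur.reverse :: mySplit rest [] else mySplit rest (c :: cur)

/-- A's forbidden-segment test, named. -/
def badSeg (p : List Char) : Bool := decide (p = []) || decide (p = ['.']) || decide (p = ['.', '.'])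

lemma go_eq (l : List Char) : ∀ (fuel : Nat), l.length ≤ fuel → ∀ (cur : List Char) (acc : List (List Char)),
    PySem.Chars.splitOn.go ['/'] fuel l cur acc = acc.reverse ++ mySplit l cur := by
  induction l with
  | nil =>
    intro fuel _ cur acc
    cases fuel <;> simp [PySem.Chars.splitOn.go, mySplit]
  | cons c rest ih =>
    intro fuel hf cur acc
    cases fuel with
    | zero => simp at hf
    | succ f =>
      rw [PySem.Chars.splitOn.go]
      simp only [List.isPrefixOf, Bool.and_true, List.length_cons] at hf ⊢
      by_cases hc : c = '/'
      · subst hc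
        simp only [beq_self_eq_true, if_pos, List.length_nil, List.drop_succ_cons, List.drop_zero]
        rw [ih f (by omega)]
        simp [mySplit]
      · have : ('/' == c) = false := by simp [beq_eq_false_iff_ne]; exact fun h => hc h.symm
        simp only [this, if_neg, Bool.false_eq_true, not_false_eq_true]
        rw [ih f (by omega)]
        simp [mySplit, hc]

lemma all_dot (cur : List Char) : (cur.all fun x => x == '.') = decide (∀ x ∈ cur, x = '.') := by
  rw [Bool.eq_iff_iff]; simp

lemma badSeg_char (p : List Char) :
    badSeg p = (decide (p.length = 0) || (p.all (· == '.') && decide (p.length ≤ 2))) := by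
  match p with
  | [] => rfl
  | [a] => simp [badSeg, beq_eq_decide]
  | [a, b] => simp [badSeg, List.cons.injEq, and_comm, beq_eq_decide]
  | a :: b :: c :: r => simp [badSeg]

lemma badSeg_rev (cur : List Char) : badSeg cur.reverse
    = (decide (cur.length = 0) || (decide (∀ x ∈ cur, x = '.') && decide (cur.length ≤ 2))) := by
  rw [badSeg_char, List.length_reverse, List.all_reverse, all_dot]

/-- Loop invariant: B's scan with state (cur.length, all-dots cur) decides A's per-segment test. -/
lemma alt_eq (l : List Char) : ∀ (cur : List Char),
    altLoop (l ++ ['/']) cur.length (decide (∀ x ∈ cur, x = '.')) = !(mySplit l cur).any badSeg := by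
  induction l with
  | nil =>
    intro cur
    simp only [List.nil_append, altLoop, mySplit, List.any_cons, List.any_nil, Bool.or_false,
      badSeg_rev, beq_eq_decide]
    by_cases h1 : cur.length = 0 <;> by_cases h2 : ∀ x ∈ cur, x = '.' <;>
      by_cases h3 : cur.length ≤ 2 <;> simp [h1, h2, h3]
  | cons c rest ih =>
    intro cur
    simp only [List.cons_append, altLoop, mySplit]
    by_cases hc : c = '/'
    · subst hc
      have h0 := ih []
      simp only [List.length_nil] at h0
      norm_num at h0
      simp only [beq_eq_decide, h0]
      by_cases h1 : cur.length = 0 <;> by_cases h2 : ∀ x ∈ cur, x = '.' <;>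
        by_cases h3 : cur.length ≤ 2 <;> simp [h1, h2, h3, badSeg_rev]
    · simp only [if_neg hc]
      have := ih (c :: cur)
      simp only [List.length_cons, List.mem_cons, forall_eq_or_imp] at this
      have harg : (decide (∀ x ∈ cur, x = '.') && (c == '.')) = decide (c = '.' ∧ ∀ x ∈ cur, x = '.') := by
        rw [beq_eq_decide, ← Bool.decide_and, decide_eq_decide]
        tauto
      rw [harg]
      exact this

/-- The whole body after normalization, as a function of the normalized string. -/
lemma body_eq (n : String) :
    (if PySem.Str.len n == 0 then false
     else if PySem.Str.startswith n "/" || PySem.Str.startswith n "./" then false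
     else if (PySem.Chars.splitOn n.toList ['/']).any
               (fun p => decide (p = []) || decide (p = ['.']) || decide (p = ['.', '.'])) then false
     else true)
    = altLoop (n.toList ++ ['/']) 0 true := by
  have hB : altLoop (n.toList ++ ['/']) 0 true = !(mySplit n.toList []).any badSeg := by
    have := alt_eq n.toList []
    simpa using this
  have hlen : PySem.Str.len n = n.toList.length := by simp [PySem.Str.len]
  have hsw : ∀ p : String, PySem.Str.startswith n p = p.toList.isPrefixOf n.toList := by
    intro p; simp [PySem.Str.startswith, PySem.Chars.startswith]
  have hsplit : PySem.Chars.splitOn n.toList ['/'] = mySplit n.toList [] := by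
    rw [PySem.Chars.splitOn, go_eq n.toList (n.toList.length + 1) (by omega)]
    rfl
  rw [hB, hlen, hsw, hsw, hsplit]
  generalize n.toList = cs
  rcases cs with _ | ⟨c, r⟩
  · simp [mySplit, badSeg]
  rcases eq_or_ne c '/' with rfl | hc
  · simp [mySplit, badSeg, List.isPrefixOf]
  have hc' : ('/' == c) = false := by simp [beq_eq_false_iff_ne]; exact fun h => hc h.symm
  have h1 : (['/'].isPrefixOf (c :: r)) = false := by simp [List.isPrefixOf, hc']
  rcases r with _ | ⟨d, r2⟩
  · simp [List.isPrefixOf, hc', mySplit, hc, badSeg]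
  rcases eq_or_ne c '.' with rfl | hcdot
  · rcases eq_or_ne d '/' with rfl | hd
    · simp [List.isPrefixOf, mySplit, badSeg]
    · have hd' : ('/' == d) = false := by simp [beq_eq_false_iff_ne]; exact fun h => hd h.symm
      have hz : ((r2.length : Int) + 1 + 1 ≠ 0) := by omega
      unfold badSeg
      simp [List.isPrefixOf, hc', hd', mySplit, hc, hd, hz]
      rw [Bool.eq_iff_iff]; simp
  · have hdot' : ('.' == c) = false := by simp [beq_eq_false_iff_ne]; exact fun h => hcdot h.symm
    have hz : ((r2.length : Int) + 1 + 1 ≠ 0) := by omega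
    unfold badSeg
    simp [List.isPrefixOf, hc', hdot', mySplit, hc, hz]
    rw [Bool.eq_iff_iff]; simp

-- ===== VERDICT (by name: the statement is the Claim_ definition above) =====
theorem is_safe_storage_key_py_spec : Claim_equal_is_safe_storage_key_py := by
  intro s _
  unfold Spec_is_safe_storage_key_py is_safe_storage_key_py is_safe_storage_key_py_alt
  exact body_eq _
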